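-- pv_equiv track=rewrite | github.com/simonzack/numtowords | numtowords.py | triplets
-- ===== SOURCE A (Python) =====
-- import math
--
-- def triplets(l):
-- 	'''Split list to triplets. Pad last one with '' if needed'''
-- 	res = []
-- 	for i in range(int(math.ceil(len(l) / 3.0))):
-- 		sect = l[i * 3 : (i + 1) * 3]
-- 		if len(sect) < 3: # Pad last section
-- 			sect += [''] * (3 - len(sect))
-- 		res.append(sect)
-- 	return res
-- ===== SOURCE B (Python) =====
-- def triplets(l):
-- 	'''Split list to triplets. Pad last one with '' if needed'''
-- 	res = []
-- 	it = iter(l)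
-- 	for a in it:
-- 		b = next(it, '')
-- 		c = next(it, '')
-- 		res.append([a, b, c])
-- 	return res
-- ===== Notes on version B (the rewrite author's own statement) =====
-- stated objective: idiomatic
-- what changed: Replaces the ceil-based index loop with arithmetic slices and explicit padding by the grouper idiom: one shared iterator consumed three elements at a time, with next()'s default supplying the '' padding.
import Mathlib
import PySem

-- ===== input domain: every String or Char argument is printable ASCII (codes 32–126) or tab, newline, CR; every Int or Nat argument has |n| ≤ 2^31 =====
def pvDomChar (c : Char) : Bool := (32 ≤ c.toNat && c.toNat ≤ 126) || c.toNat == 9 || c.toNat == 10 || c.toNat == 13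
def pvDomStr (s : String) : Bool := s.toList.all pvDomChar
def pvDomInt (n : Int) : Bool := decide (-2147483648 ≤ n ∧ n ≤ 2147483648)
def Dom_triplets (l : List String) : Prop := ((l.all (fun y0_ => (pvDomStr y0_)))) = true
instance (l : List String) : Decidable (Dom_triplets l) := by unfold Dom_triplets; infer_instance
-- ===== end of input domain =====

-- B replaces A's ceil-based index loop with arithmetic slices by the grouper
-- idiom: one shared iterator consumed three at a time, next()'s default padding
-- with '' (idiomatic; same O(n) cost).

-- ===== PORT A =====
-- int(math.ceil(len(l) / 3.0)) : exact as (len + 2) / 3 in Nat — the float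
-- division is exact enough for every list length (≤ 2^52), so ceil(n/3.0) = ⌈n/3⌉.
def triplets (l : List String) : List (List String) :=
  (PySem.List.pyRange 0 ((l.length + 2) / 3 : Nat) 1).foldl
    (fun res i =>
      let sect := PySem.List.slice l (some (i * 3)) (some ((i + 1) * 3))
      let sect := if sect.length < 3 then sect ++ List.replicate (3 - sect.length) "" else sect
      res ++ [sect])
    []

-- ===== PORT B =====
-- for a in it: b = next(it, ''); c = next(it, ''); res.append([a,b,c])  —
-- consuming the shared iterator = structural recursion on the remaining list;
-- next(it, '') = headD "" of the remainder, then advance (tail).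
def triplets_alt : List String → List (List String)
  | [] => []
  | a :: rest =>
    [a, rest.headD "", rest.tail.headD ""] :: triplets_alt rest.tail.tail
termination_by l => l.length
decreasing_by simp [List.length_tail]; omega

-- ===== PRECONDITION & SPEC =====
def Spec_triplets (l : List String) (out : List (List String)) : Prop := out = triplets_alt l
instance (l : List String) (out : List (List String)) : Decidable (Spec_triplets l out) := by unfold Spec_triplets; infer_instance

-- ===== CLAIM (what is proved, stated in full; the proofs are below) =====
def Claim_equal_triplets : Prop := ∀ (l : List String), Dom_triplets l → Spec_triplets l (triplets l)

-- ===== LEMMAS AND PROOFS =====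

-- A's loop body over range, rewritten as a map over List.range with Nat indices.
lemma triplets_eq_map (l : List String) :
    triplets l = (List.range ((l.length + 2) / 3)).map (fun k =>
      let s := (l.drop (3 * k)).take 3
      if s.length < 3 then s ++ List.replicate (3 - s.length) "" else s) := by
  unfold triplets
  rw [PySem.List.foldl_append_singleton_eq_map, PySem.List.pyRange_one]
  simp only [List.map_map, List.nil_append, Int.sub_zero, Int.toNat_natCast]
  refine List.map_congr_left (fun k _ => ?_)
  have h1 : (0 + (k : Int)) * 3 = ((3 * k : Nat) : Int) := by push_cast; ring
  have h2 : (0 + (k : Int) + 1) * 3 = ((3 * k : Nat) : Int) + ((3 : Nat) : Int) := by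
    push_cast; ring
  simp only [Function.comp, h1, h2, PySem.List.slice_natCast_add]

lemma triplets_main (l : List String) : triplets l = triplets_alt l := by
  rw [triplets_eq_map]
  induction l using triplets_alt.induct with
  | case1 => simp [triplets_alt]
  | case2 a rest ih =>
    rcases rest with _ | ⟨b, _ | ⟨c, rest'⟩⟩
    · simp [triplets_alt]
    · simp [triplets_alt]
    · have hn : (((a :: b :: c :: rest').length + 2) / 3) = (rest'.length + 2) / 3 + 1 := by
        simp [List.length_cons]; omega
      rw [hn, List.range_succ_eq_map]
      simp only [List.map_cons, List.map_map, triplets_alt, List.tail_cons] at *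
      congr 1


-- ===== VERDICT (by name: the statement is the Claim_ definition above) =====
theorem triplets_spec : Claim_equal_triplets := by
  intro l _
  exact triplets_main l
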